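-- pv_equiv track=rewrite | github.com/PratikGarai/Coding-Challenges | CodeChef/SubsegmentSum.py | min_counter
-- ===== SOURCE A (Python) =====
-- def min_counter(a,n):
--     a.append(a[n-1]+2)
--     sum_of_mins = 0
--     segment_min = n
--     digit_count = 1
--     for i in range(1,n+1):
--         if a[i]-a[i-1]>=1:
--             if digit_count<segment_min:
--                 segment_min = digit_count
--             digit_count = 1
--             if a[i]-a[i-1]>1:
--                 sum_of_mins += segment_min
--                 segment_min = n
--         else :
--             digit_count += 1
--     return sum_of_mins
-- ===== SOURCE B (Python) =====
-- def min_counter(a, n):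
--     # Same append side effect as A (mutates a); equivalence is about the return value.
--     a.append(a[n - 1] + 2)
--     # Run-end positions: indices i (1..n) where the difference to the previous
--     # element is at least 1.  The run ending at cut c started right after the
--     # previous cut, so its length is c - prev.
--     cuts = [i for i in range(1, n + 1) if a[i] - a[i - 1] >= 1]
--     total = 0
--     seg = []      # run lengths of the current segment
--     prev = 0
--     for c in cuts:
--         seg.append(c - prev)
--         prev = c
--         if a[c] - a[c - 1] > 1:   # gap > 1 closes the segment
--             total += min(seg)
--             seg = []
--     return total
-- ===== Notes on version B (the rewrite author's own statement) =====
-- stated objective: alternative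
-- what changed: Replaces A's single interleaved loop with three running counters by a two-level grouping: first collect the run-end cut positions (indices with gap >= 1), then fold over the cuts accumulating each segment's run lengths and adding min(run lengths) whenever a gap > 1 closes the segment.
import Mathlib
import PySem

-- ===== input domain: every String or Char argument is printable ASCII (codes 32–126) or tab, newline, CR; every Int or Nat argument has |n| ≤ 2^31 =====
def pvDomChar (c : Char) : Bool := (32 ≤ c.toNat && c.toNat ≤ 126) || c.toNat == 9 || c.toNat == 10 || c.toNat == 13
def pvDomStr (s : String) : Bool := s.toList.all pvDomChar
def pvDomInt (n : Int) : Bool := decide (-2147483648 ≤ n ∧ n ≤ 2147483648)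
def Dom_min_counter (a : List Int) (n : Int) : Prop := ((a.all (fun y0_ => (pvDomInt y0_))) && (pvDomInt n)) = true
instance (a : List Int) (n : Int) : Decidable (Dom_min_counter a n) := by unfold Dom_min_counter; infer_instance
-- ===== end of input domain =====

-- B replaces A's single interleaved loop (three running counters) by a two-level grouping over
-- cut positions; same cost, different decomposition.  Both Pythons append a[n-1]+2 to `a` in
-- place; the equivalence proved here is about the return value.

-- ===== PORT A =====
-- the body of A's for-loop, as a fold step over i = 1..n; state = (sum_of_mins, segment_min, digit_count)
def pvStepA (b : List Int) (n : Int) (s : Int × Int × Int) (i : Int) : Int × Int × Int :=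
  if PySem.List.pyGetD b i 0 - PySem.List.pyGetD b (i-1) 0 ≥ 1 then
    let segmin := if s.2.2 < s.2.1 then s.2.2 else s.2.1
    if PySem.List.pyGetD b i 0 - PySem.List.pyGetD b (i-1) 0 > 1 then
      (s.1 + segmin, n, 1)
    else
      (s.1, segmin, 1)
  else
    (s.1, s.2.1, s.2.2 + 1)

def min_counter (a : List Int) (n : Int) : Int :=
  let b := a ++ [PySem.List.pyGetD a (n-1) 0 + 2]   -- a.append(a[n-1]+2); Pre_ excludes the IndexError
  ((PySem.List.pyRange 1 (n+1) 1).foldl (pvStepA b n) (0, n, 1)).1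

-- ===== PORT B =====
-- fold step over the cut positions; state = (total, seg, prev)
def pvStepB (b : List Int) (s : Int × List Int × Int) (c : Int) : Int × List Int × Int :=
  let seg := s.2.1 ++ [c - s.2.2]
  if PySem.List.pyGetD b c 0 - PySem.List.pyGetD b (c-1) 0 > 1 then
    (s.1 + (PySem.List.min? seg (fun y => y)).getD 0, [], c)
  else
    (s.1, seg, c)

def min_counter_alt (a : List Int) (n : Int) : Int :=
  let b := a ++ [PySem.List.pyGetD a (n-1) 0 + 2]   -- a.append(a[n-1]+2); Pre_ excludes the IndexError
  let cuts := (PySem.List.pyRange 1 (n+1) 1).filter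
      (fun i => PySem.List.pyGetD b i 0 - PySem.List.pyGetD b (i-1) 0 ≥ 1)
  (cuts.foldl (pvStepB b) (0, [], 0)).1

-- ===== PRECONDITION & SPEC =====
-- Pre_ = exactly the inputs on which the Python A returns: a[n-1] must exist (a nonempty,
-- -len ≤ n-1) and every loop index must be valid (n ≤ len); outside, both Pythons raise IndexError.
def Pre_min_counter (a : List Int) (n : Int) : Prop :=
  a ≠ [] ∧ 1 - (a.length : Int) ≤ n ∧ n ≤ (a.length : Int)
instance (a : List Int) (n : Int) : Decidable (Pre_min_counter a n) := by
  unfold Pre_min_counter; infer_instance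

def pvWitness_min_counter : List Int × Int := ([1, 2, 5], 3)

def Spec_min_counter (a : List Int) (n : Int) (out : Int) : Prop := out = min_counter_alt a n
instance (a : List Int) (n : Int) (out : Int) : Decidable (Spec_min_counter a n out) := by
  unfold Spec_min_counter; infer_instance

-- ===== CLAIM (what is proved, stated in full; the proofs are below) =====
def Claim_equal_min_counter : Prop :=
  ∀ (a : List Int) (n : Int), Dom_min_counter a n → Pre_min_counter a n →
    Spec_min_counter a n (min_counter a n)

-- ===== LEMMAS AND PROOFS =====

lemma pv_foldl_min_init (t : List Int) (c x : Int) :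
    t.foldl min (min c x) = min c (t.foldl min x) := by
  induction t generalizing x with
  | nil => rfl
  | cons y t ih =>
      simp only [List.foldl_cons]
      rw [min_assoc, ih]

-- min(seg ++ [d]) as Python computes it, compared with A's running minimum seeded with n
lemma pv_min_append (s : List Int) (d n : Int) (hd : d ≤ n) :
    (PySem.List.min? (s ++ [d]) (fun y => y)).getD 0 = min d (s.foldl min n) := by
  cases s with
  | nil =>
      rw [List.nil_append, PySem.List.min?_id_cons]
      simp [min_eq_left hd]
  | cons x t =>
      rw [List.cons_append, PySem.List.min?_id_cons, Option.getD_some,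
        List.foldl_append]
      simp only [List.foldl_cons, List.foldl_nil]
      have h1 : t.foldl min (min n x) = min n (t.foldl min x) := pv_foldl_min_init t n x
      rw [h1]
      rcases le_total d (t.foldl min x) with h | h <;> omega

-- one loop step at a cut position (gap >= 1): A ends a run, B appends its length
lemma pv_step_cut (b : List Int) (n c : Int) (sa : Int × Int × Int) (sb : Int × List Int × Int)
    (hcn : c ≤ n)
    (hcut : PySem.List.pyGetD b c 0 - PySem.List.pyGetD b (c-1) 0 ≥ 1)
    (h1 : sa.1 = sb.1) (h2 : sa.2.1 = sb.2.1.foldl min n)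
    (h3 : sa.2.2 = c - sb.2.2) (h4 : 0 ≤ sb.2.2) (h5 : sb.2.2 ≤ c - 1) :
    (pvStepA b n sa c).1 = (pvStepB b sb c).1 ∧
    (pvStepA b n sa c).2.1 = ((pvStepB b sb c).2.1).foldl min n ∧
    (pvStepA b n sa c).2.2 = (c + 1) - (pvStepB b sb c).2.2 ∧
    0 ≤ (pvStepB b sb c).2.2 ∧ (pvStepB b sb c).2.2 ≤ c := by
  obtain ⟨sum, segmin, dc⟩ := sa
  obtain ⟨total, seg, prev⟩ := sb
  dsimp only at h1 h2 h3 h4 h5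
  unfold pvStepA pvStepB
  rw [if_pos hcut]
  dsimp only
  have hlen : c - prev = dc := by omega
  have hmin : (PySem.List.min? (seg ++ [c - prev]) (fun y => y)).getD 0
      = if dc < segmin then dc else segmin := by
    rw [hlen, pv_min_append seg dc n (by omega), ← h2, min_def]
    split_ifs <;> omega
  by_cases hgt : PySem.List.pyGetD b c 0 - PySem.List.pyGetD b (c-1) 0 > 1
  · rw [if_pos hgt, if_pos hgt]
    exact ⟨by dsimp only; rw [hmin, h1], by simp, by dsimp only; omega,
      by dsimp only; omega, by dsimp only; omega⟩
  · rw [if_neg hgt, if_neg hgt]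
    refine ⟨h1, ?_, by dsimp only; omega, by dsimp only; omega, by dsimp only; omega⟩
    dsimp only
    rw [List.foldl_append, hlen, ← h2]
    simp only [List.foldl_cons, List.foldl_nil]
    rw [min_def]; split_ifs <;> omega

-- one loop step inside a run (gap < 1): A counts, B's fold skips the index
lemma pv_step_nocut (b : List Int) (n c : Int) (sa : Int × Int × Int) (sb : Int × List Int × Int)
    (hcut : ¬ PySem.List.pyGetD b c 0 - PySem.List.pyGetD b (c-1) 0 ≥ 1)
    (h1 : sa.1 = sb.1) (h2 : sa.2.1 = sb.2.1.foldl min n)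
    (h3 : sa.2.2 = c - sb.2.2) (h4 : 0 ≤ sb.2.2) (h5 : sb.2.2 ≤ c - 1) :
    (pvStepA b n sa c).1 = sb.1 ∧
    (pvStepA b n sa c).2.1 = (sb.2.1).foldl min n ∧
    (pvStepA b n sa c).2.2 = (c + 1) - sb.2.2 ∧
    0 ≤ sb.2.2 ∧ sb.2.2 ≤ c := by
  obtain ⟨sum, segmin, dc⟩ := sa
  dsimp only at h1 h2 h3
  unfold pvStepA
  rw [if_neg hcut]
  exact ⟨h1, h2, by dsimp only; omega, h4, by omega⟩

-- the lockstep invariant between A's fold and B's fold over the filtered range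
lemma pv_inv (b : List Int) (n : Int) (j : Nat) (hj : (j : Int) ≤ n) :
    ((PySem.List.pyRange 1 ((j:Int)+1) 1).foldl (pvStepA b n) (0, n, 1)).1 =
      (((PySem.List.pyRange 1 ((j:Int)+1) 1).filter
        (fun i => PySem.List.pyGetD b i 0 - PySem.List.pyGetD b (i-1) 0 ≥ 1)).foldl
        (pvStepB b) (0, [], 0)).1 ∧
    ((PySem.List.pyRange 1 ((j:Int)+1) 1).foldl (pvStepA b n) (0, n, 1)).2.1 =
      ((((PySem.List.pyRange 1 ((j:Int)+1) 1).filter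
        (fun i => PySem.List.pyGetD b i 0 - PySem.List.pyGetD b (i-1) 0 ≥ 1)).foldl
        (pvStepB b) (0, [], 0)).2.1).foldl min n ∧
    ((PySem.List.pyRange 1 ((j:Int)+1) 1).foldl (pvStepA b n) (0, n, 1)).2.2 =
      (j : Int) + 1 - (((PySem.List.pyRange 1 ((j:Int)+1) 1).filter
        (fun i => PySem.List.pyGetD b i 0 - PySem.List.pyGetD b (i-1) 0 ≥ 1)).foldl
        (pvStepB b) (0, [], 0)).2.2 ∧
    0 ≤ (((PySem.List.pyRange 1 ((j:Int)+1) 1).filter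
        (fun i => PySem.List.pyGetD b i 0 - PySem.List.pyGetD b (i-1) 0 ≥ 1)).foldl
        (pvStepB b) (0, [], 0)).2.2 ∧
    (((PySem.List.pyRange 1 ((j:Int)+1) 1).filter
        (fun i => PySem.List.pyGetD b i 0 - PySem.List.pyGetD b (i-1) 0 ≥ 1)).foldl
        (pvStepB b) (0, [], 0)).2.2 ≤ (j : Int) := by
  induction j with
  | zero =>
      rw [PySem.List.pyRange_one_eq_nil (by norm_num)]
      simp
  | succ j ih =>
      have hj' : (j : Int) ≤ n := by push_cast at hj ⊢; omega
      obtain ⟨h1, h2, h3, h4, h5⟩ := ih hj'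
      simp only [Nat.cast_add, Nat.cast_one] at hj ⊢
      have hrange : PySem.List.pyRange 1 ((j:Int) + 1 + 1) 1
          = PySem.List.pyRange 1 ((j:Int)+1) 1 ++ [(j:Int)+1] := by
        rw [PySem.List.pyRange_one_succ_right (by omega)]
      rw [hrange, List.filter_append, List.foldl_append]
      by_cases hcut : PySem.List.pyGetD b ((j:Int)+1) 0 - PySem.List.pyGetD b ((j:Int)+1-1) 0 ≥ 1
      · have hfil : List.filter
            (fun i => PySem.List.pyGetD b i 0 - PySem.List.pyGetD b (i-1) 0 ≥ 1) [(j:Int)+1]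
            = [(j:Int)+1] := by
          simp only [List.filter_cons, List.filter_nil, decide_eq_true hcut, if_true]
        rw [hfil, List.foldl_append]
        simp only [List.foldl_cons, List.foldl_nil]
        obtain ⟨g1, g2, g3, g4, g5⟩ :=
          pv_step_cut b n ((j:Int)+1) _ _ hj hcut h1 h2 (by omega) h4 (by omega)
        exact ⟨g1, g2, by omega, g4, g5⟩
      · have hfil : List.filter
            (fun i => PySem.List.pyGetD b i 0 - PySem.List.pyGetD b (i-1) 0 ≥ 1) [(j:Int)+1]
            = [] := by
          simp only [List.filter_cons, List.filter_nil, decide_eq_false hcut,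
            Bool.false_eq_true, if_false]
        rw [hfil, List.append_nil]
        simp only [List.foldl_cons, List.foldl_nil]
        obtain ⟨g1, g2, g3, g4, g5⟩ :=
          pv_step_nocut b n ((j:Int)+1) _ _ hcut h1 h2 (by omega) h4 (by omega)
        exact ⟨g1, g2, by omega, g4, by omega⟩

-- ===== VERDICT (by name: the statement is the Claim_ definition above) =====
theorem min_counter_spec : Claim_equal_min_counter := by
  intro a n _ _
  unfold Spec_min_counter min_counter min_counter_alt
  by_cases hn : n ≤ 0
  · rw [PySem.List.pyRange_one_eq_nil (by omega)]
    simp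
  · have h1 : (n.toNat : Int) = n := by omega
    have := (pv_inv (a ++ [PySem.List.pyGetD a (n-1) 0 + 2]) n n.toNat (by omega)).1
    rw [h1] at this
    exact this
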